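-- pv_equiv track=rewrite | github.com/ATB-UQ/chemical_equivalence | calcChemEquivalency.py | atomic_equivalence_dict_to_group_equivalence_dict
-- ===== SOURCE A (Python) =====
-- from typing import Optional, List, Dict, Tuple, Any
-- from itertools import groupby
-- from operator import itemgetter
--
-- def atomic_equivalence_dict_to_group_equivalence_dict(atomic_equivalence_dict: Dict[int, int]) -> Dict[int, List[int]]:
--     on_equivalence_group_id = itemgetter(1)
--     get_atom_id = itemgetter(0)
--
--     return {
--         equivalence_group_id: [
--             get_atom_id(item) for item in group
--         ]
--         for (equivalence_group_id, group) in
--         groupby(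
--             sorted(
--                 atomic_equivalence_dict.items(),
--                 key=on_equivalence_group_id,
--             ),
--             key=on_equivalence_group_id,
--         )
--     }
-- ===== SOURCE B (Python) =====
-- def atomic_equivalence_dict_to_group_equivalence_dict(atomic_equivalence_dict):
--     buckets = {}
--     for atom_id, equivalence_group_id in atomic_equivalence_dict.items():
--         buckets.setdefault(equivalence_group_id, []).append(atom_id)
--     return {group_id: buckets[group_id] for group_id in sorted(buckets)}
-- ===== Notes on version B (the rewrite author's own statement) =====
-- stated objective: alternative
-- what changed: Replaces the global sort of all n items plus itertools.groupby with a single bucketing pass (dict.setdefault appending each atom id to its group's bucket) followed by sorting only the distinct group ids.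
import Mathlib
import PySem

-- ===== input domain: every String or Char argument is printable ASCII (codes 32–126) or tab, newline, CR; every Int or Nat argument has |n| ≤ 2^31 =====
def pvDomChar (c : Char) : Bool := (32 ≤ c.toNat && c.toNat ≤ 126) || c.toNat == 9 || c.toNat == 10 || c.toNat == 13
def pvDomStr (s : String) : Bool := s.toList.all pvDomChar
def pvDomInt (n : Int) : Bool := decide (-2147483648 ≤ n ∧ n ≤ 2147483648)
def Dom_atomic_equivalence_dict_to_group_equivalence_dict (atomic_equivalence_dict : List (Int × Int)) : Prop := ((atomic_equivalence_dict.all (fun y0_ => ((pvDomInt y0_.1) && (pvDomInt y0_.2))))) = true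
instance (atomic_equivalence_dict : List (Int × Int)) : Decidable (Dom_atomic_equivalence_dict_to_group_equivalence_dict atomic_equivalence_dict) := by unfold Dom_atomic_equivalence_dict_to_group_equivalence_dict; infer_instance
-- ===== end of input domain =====

-- B replaces A's global sort + groupby by one bucketing pass over the items plus a sort of the distinct group ids only (alternative algorithm, same result).


-- ===== PORT A =====
-- itertools.groupby over a list, keyed by the second component, with each group
-- immediately consumed into the list of its first components (A's comprehension body).
def pvGroupby : List (Int × Int) → List (Int × List Int)
  | [] => []
  | (a, g) :: rest =>
      (g, a :: (rest.takeWhile (fun p => p.2 == g)).map (fun p => p.1))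
        :: pvGroupby (rest.dropWhile (fun p => p.2 == g))
termination_by xs => xs.length
decreasing_by
  have := List.length_dropWhile_le (fun p => p.2 == g) rest
  simp only [List.length_cons]; omega

def atomic_equivalence_dict_to_group_equivalence_dict (atomic_equivalence_dict : List (Int × Int)) : List (Int × List Int) :=
  -- the argument is a Python dict: its items() are the assoc list collapsed dict-style
  let items := (PySem.Dict.ofList atomic_equivalence_dict).items
  -- sorted(items, key=itemgetter(1)), then groupby by the same key, as a dict comprehension
  (PySem.Dict.ofList (pvGroupby (PySem.List.sorted items (fun p => p.2)))).items

-- ===== PORT B =====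
def atomic_equivalence_dict_to_group_equivalence_dict_alt (atomic_equivalence_dict : List (Int × Int)) : List (Int × List Int) :=
  let items := (PySem.Dict.ofList atomic_equivalence_dict).items
  -- for atom_id, gid in items: buckets.setdefault(gid, []).append(atom_id)
  let buckets := items.foldl (fun d p => d.modify p.2 ([] : List Int) (fun l => l ++ [p.1])) PySem.Dict.empty
  -- {g: buckets[g] for g in sorted(buckets)} — the sorted keys are distinct, so the dict is this assoc list
  (PySem.List.sorted buckets.keys (fun g => g)).map (fun g => (g, buckets.getD g []))

-- ===== PRECONDITION & SPEC =====
def Spec_atomic_equivalence_dict_to_group_equivalence_dict (atomic_equivalence_dict : List (Int × Int)) (out : List (Int × List Int)) : Prop := out = atomic_equivalence_dict_to_group_equivalence_dict_alt atomic_equivalence_dict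
instance (atomic_equivalence_dict : List (Int × Int)) (out : List (Int × List Int)) : Decidable (Spec_atomic_equivalence_dict_to_group_equivalence_dict atomic_equivalence_dict out) := by unfold Spec_atomic_equivalence_dict_to_group_equivalence_dict; infer_instance

-- ===== CLAIM (what is proved, stated in full; the proofs are below) =====
def Claim_equal_atomic_equivalence_dict_to_group_equivalence_dict : Prop := ∀ (atomic_equivalence_dict : List (Int × Int)), Dom_atomic_equivalence_dict_to_group_equivalence_dict atomic_equivalence_dict → Spec_atomic_equivalence_dict_to_group_equivalence_dict atomic_equivalence_dict (atomic_equivalence_dict_to_group_equivalence_dict atomic_equivalence_dict)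

-- ===== LEMMAS AND PROOFS =====

-- insertBy puts x in front when x goes before every element
theorem pv_insertBy_all_before {α : Type} (before : α → α → Bool) (x : α) (ys : List α)
    (h : ∀ p ∈ ys, before x p = true) :
    PySem.List.insertBy before x ys = x :: ys := by
  cases ys with
  | nil => rfl
  | cons y ys => simp [PySem.List.insertBy, h y (by simp)]

-- insertBy passes over a prefix x goes after
theorem pv_insertBy_append_not_before {α : Type} (before : α → α → Bool) (x : α) (B rest : List α)
    (h : ∀ p ∈ B, before x p = false) :
    PySem.List.insertBy before x (B ++ rest) = B ++ PySem.List.insertBy before x rest := by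
  induction B with
  | nil => rfl
  | cons b B ih =>
      simp only [List.cons_append, PySem.List.insertBy, h b (by simp)]
      simp only [Bool.false_eq_true, if_false, List.cons.injEq, true_and]
      exact ih (fun p hp => h p (by simp [hp]))

-- inserting one pair into a key-blocked list = inserting its key among the block keys
theorem pv_ins_flat (x : Int × Int) (G : List Int) (F : Int → List (Int × Int))
    (hF : ∀ g ∈ G, ∀ p ∈ F g, p.2 = g) (hG : G.Pairwise (· < ·))
    (hnew : x.2 ∉ G → F x.2 = []) :
    PySem.List.insertBy (fun a b => decide (a.2 < b.2)) x (G.flatMap F)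
      = (if x.2 ∈ G then G else PySem.List.insertBy (fun a b => decide (a < b)) x.2 G).flatMap
          (fun g => if g = x.2 then F g ++ [x] else F g) := by
  induction G with
  | nil =>
      simp [PySem.List.insertBy, hnew (by simp)]
  | cons g G ih =>
      have hgt : ∀ g' ∈ G, g < g' := (List.pairwise_cons.mp hG).1
      rcases lt_trichotomy x.2 g with hlt | heq | hgtx
      · -- x's key is below every key: x goes in front, as a fresh block
        have hmem : x.2 ∉ g :: G := by
          intro hm; rcases List.mem_cons.mp hm with h | h
          · omega
          · exact absurd (hgt _ h) (by omega)
        have h1 : PySem.List.insertBy (fun a b => decide (a.2 < b.2)) x ((g :: G).flatMap F)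
            = x :: (g :: G).flatMap F := by
          apply pv_insertBy_all_before
          intro p hp
          rcases List.mem_flatMap.mp hp with ⟨g', hg', hpF⟩
          have : p.2 = g' := hF g' hg' p hpF
          have : x.2 < g' := by
            rcases List.mem_cons.mp hg' with h | h
            · omega
            · exact lt_trans hlt (hgt _ h)
          simp [*]
        rw [h1, if_neg hmem]
        have h2 : PySem.List.insertBy (fun a b => decide (a < b)) x.2 (g :: G)
            = x.2 :: g :: G := by
          apply pv_insertBy_all_before
          intro p hp
          rcases List.mem_cons.mp hp with h | h
          · simp [h, hlt]
          · simp [lt_trans hlt (hgt _ h)]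
        rw [h2]
        simp only [List.flatMap_cons, hnew hmem, List.nil_append]
        congr 1
        have : ∀ g' ∈ g :: G, (if g' = x.2 then F g' ++ [x] else F g') = F g' := by
          intro g' hg'
          have : g' ≠ x.2 := by
            rcases List.mem_cons.mp hg' with h | h
            · omega
            · have := hgt _ h; omega
          simp [this]
        exact (List.flatMap_congr (fun a ha => (this a ha).symm))
      · -- x's key equals the head block key: x appended to that block
        have hmem : x.2 ∈ g :: G := by simp [heq]
        rw [if_pos hmem]
        simp only [List.flatMap_cons]
        have h1 : PySem.List.insertBy (fun a b => decide (a.2 < b.2)) x (F g ++ G.flatMap F)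
            = F g ++ PySem.List.insertBy (fun a b => decide (a.2 < b.2)) x (G.flatMap F) := by
          apply pv_insertBy_append_not_before
          intro p hp
          have : p.2 = g := hF g (by simp) p hp
          simp [this, heq]
        have h2 : PySem.List.insertBy (fun a b => decide (a.2 < b.2)) x (G.flatMap F)
            = x :: G.flatMap F := by
          apply pv_insertBy_all_before
          intro p hp
          rcases List.mem_flatMap.mp hp with ⟨g', hg', hpF⟩
          have e1 : p.2 = g' := hF g' (by simp [hg']) p hpF
          have e2 := hgt _ hg'
          simp only [decide_eq_true_eq]
          omega
        rw [h1, h2]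
        have h3 : G.flatMap (fun g' => if g' = x.2 then F g' ++ [x] else F g') = G.flatMap F := by
          apply List.flatMap_congr
          intro g' hg'
          have := hgt _ hg'
          have : g' ≠ x.2 := by omega
          simp [this]
        rw [h3, if_pos heq.symm]
        simp
      · -- x's key is above the head block key: skip the head block and recurse
        have h1 : PySem.List.insertBy (fun a b => decide (a.2 < b.2)) x ((g :: G).flatMap F)
            = F g ++ PySem.List.insertBy (fun a b => decide (a.2 < b.2)) x (G.flatMap F) := by
          simp only [List.flatMap_cons]
          apply pv_insertBy_append_not_before
          intro p hp
          have : p.2 = g := hF g (by simp) p hp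
          simp [this]; omega
        have hne : x.2 ≠ g := by omega
        have hne' : g ≠ x.2 := Ne.symm hne
        have hmemiff : (x.2 ∈ g :: G) ↔ (x.2 ∈ G) := by simp [hne]
        rw [h1, ih (fun g' hg' => hF g' (by simp [hg'])) (List.pairwise_cons.mp hG).2
              (fun hm => hnew (by simp [hne, hm]))]
        by_cases hmem : x.2 ∈ G
        · rw [if_pos hmem, if_pos (hmemiff.mpr hmem)]
          simp [List.flatMap_cons, hne']
        · rw [if_neg hmem, if_neg (fun h => hmem (hmemiff.mp h))]
          have : PySem.List.insertBy (fun a b => decide (a < b)) x.2 (g :: G)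
              = g :: PySem.List.insertBy (fun a b => decide (a < b)) x.2 G := by
            simp only [PySem.List.insertBy]
            have : ¬ (x.2 < g) := by omega
            simp [this]
          rw [this]
          simp [List.flatMap_cons, hne']

-- stable sort by key = sorted distinct keys, each expanded to its filter block
theorem pv_sorted_snd_eq_flatMap (l : List (Int × Int)) :
    PySem.List.sorted l (fun p => p.2)
      = (PySem.List.sorted (PySem.Set.ofList (l.map (fun p => p.2))) (fun g => g)).flatMap
          (fun g => l.filter (fun p => p.2 == g)) := by
  induction l using List.reverseRecOn with
  | nil => simp [PySem.List.sorted]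
  | append_singleton l x ih =>
      rw [PySem.List.sorted_eq_foldl_insertBy, List.foldl_append,
          ← PySem.List.sorted_eq_foldl_insertBy, ih]
      simp only [List.foldl_cons, List.foldl_nil]
      set G := PySem.List.sorted (PySem.Set.ofList (l.map (fun p => p.2))) (fun g => g) with hGdef
      have hG : G.Pairwise (· < ·) := PySem.List.sorted_ofList_pairwise_lt _
      have hmemG : ∀ g, g ∈ G ↔ g ∈ l.map (fun p => p.2) := by
        intro g; rw [hGdef, PySem.List.mem_sorted, PySem.Set.mem_ofList]
      have hstep := pv_ins_flat x G (fun g => l.filter (fun p => p.2 == g))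
        (fun g _ p hp => by simpa using (List.mem_filter.mp hp).2)
        hG
        (fun hnm => by
          rw [List.filter_eq_nil_iff]
          intro p hp hbeq
          exact hnm ((hmemG x.2).mpr (List.mem_map.mpr ⟨p, hp, by simpa using hbeq⟩)))
      rw [hstep]
      -- identify the new key list and the new blocks
      have hkeys : PySem.List.sorted (PySem.Set.ofList ((l ++ [x]).map (fun p => p.2))) (fun g => g)
          = if x.2 ∈ G then G else PySem.List.insertBy (fun a b => decide (a < b)) x.2 G := by
        rw [List.map_append]
        simp only [List.map_cons, List.map_nil]
        rw [PySem.Set.ofList_append_singleton]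
        by_cases hm : x.2 ∈ G
        · rw [if_pos hm]
          rw [PySem.Set.add_of_mem ((PySem.Set.mem_ofList _ _).mpr ((hmemG x.2).mp hm))]
        · rw [if_neg hm, PySem.Set.add_of_not_mem (fun h => hm ((hmemG x.2).mpr (by simpa using h)))]
          rw [PySem.List.sorted_eq_foldl_insertBy, List.foldl_append,
              ← PySem.List.sorted_eq_foldl_insertBy]
          simp [hGdef]
      rw [← hkeys]
      apply List.flatMap_congr
      intro g hg
      by_cases hgx : g = x.2
      · simp [hgx, List.filter_append]
      · simp [hgx, List.filter_append, Ne.symm hgx]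

-- helpers about takeWhile/dropWhile across a block boundary
theorem pv_takeWhile_nil_of_all {α : Type} (p : α → Bool) (ys : List α)
    (h : ∀ a ∈ ys, p a = false) : ys.takeWhile p = [] := by
  cases ys with
  | nil => rfl
  | cons y ys => simp [h y (by simp)]

theorem pv_dropWhile_self_of_all {α : Type} (p : α → Bool) (ys : List α)
    (h : ∀ a ∈ ys, p a = false) : ys.dropWhile p = ys := by
  cases ys with
  | nil => rfl
  | cons y ys => simp [h y (by simp)]

theorem pv_takeWhile_append_of_all {α : Type} (p : α → Bool) (t rest : List α)
    (h : ∀ a ∈ t, p a = true) : (t ++ rest).takeWhile p = t ++ rest.takeWhile p := by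
  induction t with
  | nil => rfl
  | cons a t ih =>
      simp only [List.cons_append, List.takeWhile_cons, h a (by simp), if_true]
      rw [ih (fun a ha => h a (by simp [ha]))]

theorem pv_dropWhile_append_of_all {α : Type} (p : α → Bool) (t rest : List α)
    (h : ∀ a ∈ t, p a = true) : (t ++ rest).dropWhile p = rest.dropWhile p := by
  induction t with
  | nil => rfl
  | cons a t ih =>
      simp only [List.cons_append, List.dropWhile_cons, h a (by simp), if_true]
      exact ih (fun a ha => h a (by simp [ha]))

-- groupby of a key-blocked list recovers the blocks
theorem pv_groupby_flatMap (G : List Int) (F : Int → List (Int × Int))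
    (hG : G.Pairwise (· < ·))
    (hne : ∀ g ∈ G, F g ≠ [])
    (hF : ∀ g ∈ G, ∀ p ∈ F g, p.2 = g) :
    pvGroupby (G.flatMap F) = G.map (fun g => (g, (F g).map (fun p => p.1))) := by
  induction G with
  | nil => simp [pvGroupby]
  | cons g G ih =>
      have hgt : ∀ g' ∈ G, g < g' := (List.pairwise_cons.mp hG).1
      obtain ⟨q, t, hqt⟩ : ∃ q t, F g = q :: t := by
        cases hFg : F g with
        | nil => exact absurd hFg (hne g (by simp))
        | cons q t => exact ⟨q, t, rfl⟩
      have hq2 : q.2 = g := hF g (by simp) q (by simp [hqt])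
      have ht : ∀ p ∈ t, p.2 = g := fun p hp => hF g (by simp) p (by simp [hqt, hp])
      have hrest : ∀ p ∈ G.flatMap F, (p.2 == g) = false := by
        intro p hp
        rcases List.mem_flatMap.mp hp with ⟨g', hg', hpF⟩
        have h1 : p.2 = g' := hF g' (by simp [hg']) p hpF
        have h2 := hgt _ hg'
        simp [h1]; omega
      simp only [List.flatMap_cons, hqt, List.cons_append]
      obtain ⟨a, g0⟩ := q
      simp only at hq2
      subst hq2
      rw [pvGroupby]
      rw [pv_takeWhile_append_of_all _ t _ (fun p hp => by simp [ht p hp]),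
          pv_takeWhile_nil_of_all _ _ hrest,
          pv_dropWhile_append_of_all _ t _ (fun p hp => by simp [ht p hp]),
          pv_dropWhile_self_of_all _ _ hrest]
      rw [ih (List.pairwise_cons.mp hG).2 (fun g' hg' => hne g' (by simp [hg']))
            (fun g' hg' => hF g' (by simp [hg']))]
      simp [hqt]

-- a dict built from an assoc list with distinct keys has exactly that items list
theorem pv_items_ofList_nodup {κ ν : Type} [BEq κ] [LawfulBEq κ] (l : List (κ × ν))
    (h : (l.map Prod.fst).Nodup) : (PySem.Dict.ofList l).items = l := by
  have : PySem.Dict.ofList l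
      = l.foldl (fun d a => d.insert (Prod.fst a) (Prod.snd a)) PySem.Dict.empty := rfl
  rw [this, PySem.Dict.items_foldl_insert_fresh l Prod.fst Prod.snd PySem.Dict.empty
        (fun a _ => by simp) h]
  simp [PySem.Dict.empty]

-- B's bucket dict: its keys and its contents
theorem pv_buckets_keys (is : List (Int × Int)) :
    (is.foldl (fun d p => d.modify p.2 ([] : List Int) (fun l => l ++ [p.1])) PySem.Dict.empty).keys
      = PySem.Set.ofList (is.map (fun p => p.2)) := by
  rw [PySem.Dict.keys_foldl_modify_key is (fun p => p.2) ([] : List Int)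
        (fun _ p => fun l => l ++ [p.1]) PySem.Dict.empty]
  simp [PySem.Set.update_nil_left]

theorem pv_buckets_getD (is : List (Int × Int)) (g : Int) :
    (is.foldl (fun d p => d.modify p.2 ([] : List Int) (fun l => l ++ [p.1])) PySem.Dict.empty).getD g []
      = (is.filter (fun p => p.2 == g)).map (fun p => p.1) := by
  have hfold : is.foldl (fun d p => d.modify p.2 ([] : List Int) (fun l => l ++ [p.1])) PySem.Dict.empty
      = (is.map (fun p => (p.2, p.1))).foldl
          (fun d p => d.modify p.1 ([] : List Int) (fun l => l ++ [p.2])) PySem.Dict.empty := by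
    rw [List.foldl_map]
  rw [hfold, PySem.Dict.getD_foldl_modify_append]
  simp [List.filter_map, List.map_map, Function.comp_def]

-- ===== VERDICT (by name: the statement is the Claim_ definition above) =====
theorem atomic_equivalence_dict_to_group_equivalence_dict_spec : Claim_equal_atomic_equivalence_dict_to_group_equivalence_dict := by
  intro l _
  simp only [Spec_atomic_equivalence_dict_to_group_equivalence_dict,
    atomic_equivalence_dict_to_group_equivalence_dict,
    atomic_equivalence_dict_to_group_equivalence_dict_alt]
  set is := (PySem.Dict.ofList l).items with hisdef
  set G := PySem.List.sorted (PySem.Set.ofList (is.map (fun p => p.2))) (fun g => g) with hGdef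
  have hG : G.Pairwise (· < ·) := PySem.List.sorted_ofList_pairwise_lt _
  have hmemG : ∀ g, g ∈ G ↔ g ∈ is.map (fun p => p.2) := by
    intro g; rw [hGdef, PySem.List.mem_sorted, PySem.Set.mem_ofList]
  -- A side
  have hsort := pv_sorted_snd_eq_flatMap is
  rw [← hGdef] at hsort
  have hgrp := pv_groupby_flatMap G (fun g => is.filter (fun p => p.2 == g)) hG
    (fun g hg => by
      rcases List.mem_map.mp ((hmemG g).mp hg) with ⟨p, hp, hpg⟩
      exact List.ne_nil_of_mem (List.mem_filter.mpr ⟨hp, by simp [hpg]⟩))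
    (fun g _ p hp => by simpa using (List.mem_filter.mp hp).2)
  have hnodup : ((G.map (fun g => (g, (is.filter (fun p => p.2 == g)).map (fun p => p.1)))).map Prod.fst).Nodup := by
    simp only [List.map_map]
    have hid : (Prod.fst ∘ fun g => ((g : Int), (is.filter (fun p => p.2 == g)).map (fun p => p.1))) = id := by
      funext g; rfl
    rw [hid, List.map_id]
    exact List.Pairwise.imp (fun h => ne_of_lt h) hG
  rw [hsort, hgrp, pv_items_ofList_nodup _ hnodup]
  -- B side
  rw [pv_buckets_keys is, ← hGdef]
  simp only [pv_buckets_getD]
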